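-- pv_equiv track=rewrite | github.com/Badim41/tools | discord_tools/chat_gpt.py | fix_message_history
-- ===== SOURCE A (Python) =====
-- def fix_message_history(messages):
--     converted_messages = []
--     user_message_added = False
--     assistant_message_added = False
--
--     for message in messages:
--         if message["role"] == "user" and not user_message_added:
--             converted_messages.append(message)
--             user_message_added = True
--             assistant_message_added = False
--         elif message["role"] == "assistant" and not assistant_message_added:
--             converted_messages.append(message)
--             assistant_message_added = True
--             user_message_added = False
--
--     return converted_messages
-- ===== SOURCE B (Python) =====
-- def fix_message_history(messages):
--     relevant = [m for m in messages if m["role"] in ("user", "assistant")]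
--     out = relevant[:1]
--     for prev, cur in zip(relevant, relevant[1:]):
--         if cur["role"] != prev["role"]:
--             out.append(cur)
--     return out
-- ===== Notes on version B (the rewrite author's own statement) =====
-- stated objective: idiomatic
-- what changed: Replaces the two mutually-resetting boolean flags with two phases: filter to user/assistant messages, then keep the first message and every adjacent-pair run boundary found by zipping the filtered list with its own tail.
import Mathlib
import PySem

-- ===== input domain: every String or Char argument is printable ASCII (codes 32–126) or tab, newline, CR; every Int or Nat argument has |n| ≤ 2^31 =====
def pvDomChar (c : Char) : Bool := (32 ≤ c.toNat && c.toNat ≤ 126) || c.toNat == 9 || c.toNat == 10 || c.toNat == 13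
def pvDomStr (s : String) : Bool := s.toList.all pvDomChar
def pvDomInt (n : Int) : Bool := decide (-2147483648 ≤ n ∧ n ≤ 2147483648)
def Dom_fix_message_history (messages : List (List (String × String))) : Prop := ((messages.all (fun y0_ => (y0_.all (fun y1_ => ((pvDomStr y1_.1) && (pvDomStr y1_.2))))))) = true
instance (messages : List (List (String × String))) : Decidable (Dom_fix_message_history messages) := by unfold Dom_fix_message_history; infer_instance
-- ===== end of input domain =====

-- B replaces A's two mutually-resetting boolean flags with a filter-then-collapse
-- decomposition (keep the first filtered message and each adjacent run boundary);
-- same result, same cost (objective: idiomatic).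

-- m["role"]; first match in the association list, "" only outside Pre_ (where Python raises KeyError)
def pvRole (m : List (String × String)) : String :=
  ((m.find? (fun p => p.1 == "role")).map Prod.snd).getD ""

-- ===== PORT A =====
def fix_message_history (messages : List (List (String × String))) : List (List (String × String)) :=
  (messages.foldl
    (fun (st : List (List (String × String)) × Bool × Bool) m =>
      if pvRole m == "user" && !st.2.1 then (st.1 ++ [m], true, false)
      else if pvRole m == "assistant" && !st.2.2 then (st.1 ++ [m], false, true)
      else st)
    ([], false, false)).1

-- ===== PORT B =====
def fix_message_history_alt (messages : List (List (String × String))) : List (List (String × String)) :=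
  let relevant := messages.filter (fun m => pvRole m == "user" || pvRole m == "assistant")
  (List.zip relevant (relevant.drop 1)).foldl
    (fun out pc => if pvRole pc.2 != pvRole pc.1 then out ++ [pc.2] else out)
    (relevant.take 1)

-- ===== PRECONDITION & SPEC =====
-- Pre_: every message carries a "role" key; on a message without one Python's
-- message["role"] raises KeyError in both A and B.
def Pre_fix_message_history (messages : List (List (String × String))) : Prop :=
  ∀ m ∈ messages, (m.find? (fun p => p.1 == "role")).isSome = true
instance (messages : List (List (String × String))) : Decidable (Pre_fix_message_history messages) := by unfold Pre_fix_message_history; infer_instance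

def pvWitness_fix_message_history : (List (List (String × String))) :=
  [[("role", "user"), ("content", "hi")], [("role", "assistant"), ("content", "yo")]]

def Spec_fix_message_history (messages : List (List (String × String))) (out : List (List (String × String))) : Prop := out = fix_message_history_alt messages
instance (messages : List (List (String × String))) (out : List (List (String × String))) : Decidable (Spec_fix_message_history messages out) := by unfold Spec_fix_message_history; infer_instance

-- ===== CLAIM (what is proved, stated in full; the proofs are below) =====
def Claim_equal_fix_message_history : Prop := ∀ (messages : List (List (String × String))), Dom_fix_message_history messages → Pre_fix_message_history messages → Spec_fix_message_history messages (fix_message_history messages)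

-- ===== LEMMAS AND PROOFS =====

-- proof-only characterisation: collapse runs of equal role, last appended role r
def pvCollapseFrom (r : String) : List (List (String × String)) → List (List (String × String))
  | [] => []
  | m :: rest => if pvRole m = r then pvCollapseFrom r rest else m :: pvCollapseFrom (pvRole m) rest

def pvHeadCollapse : List (List (String × String)) → List (List (String × String))
  | [] => []
  | m :: rest => m :: pvCollapseFrom (pvRole m) rest

def pvStepA (st : List (List (String × String)) × Bool × Bool) (m : List (String × String)) :
    List (List (String × String)) × Bool × Bool :=
  if pvRole m == "user" && !st.2.1 then (st.1 ++ [m], true, false)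
  else if pvRole m == "assistant" && !st.2.2 then (st.1 ++ [m], false, true)
  else st

def pvRel (m : List (String × String)) : Bool :=
  pvRole m == "user" || pvRole m == "assistant"

lemma foldA_char (msgs : List (List (String × String))) :
    ∀ acc : List (List (String × String)),
      ((msgs.foldl pvStepA (acc, true, false)).1
        = acc ++ pvCollapseFrom "user" (msgs.filter pvRel)) ∧
      ((msgs.foldl pvStepA (acc, false, true)).1
        = acc ++ pvCollapseFrom "assistant" (msgs.filter pvRel)) ∧
      ((msgs.foldl pvStepA (acc, false, false)).1
        = acc ++ pvHeadCollapse (msgs.filter pvRel)) := by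
  induction msgs with
  | nil => intro acc; simp [pvCollapseFrom, pvHeadCollapse]
  | cons m rest ih =>
    intro acc
    by_cases hu : pvRole m = "user"
    · simp [List.foldl_cons, pvStepA, pvRel, hu, pvCollapseFrom, pvHeadCollapse,
        (ih (acc ++ [m])).1, (ih acc).1]
    · by_cases ha : pvRole m = "assistant"
      · simp [List.foldl_cons, pvStepA, pvRel, ha, pvCollapseFrom, pvHeadCollapse,
          (ih (acc ++ [m])).2.1, (ih acc).2.1]
      · simp [List.foldl_cons, pvStepA, pvRel, hu, ha,
          (ih acc).1, (ih acc).2.1, (ih acc).2.2]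

lemma foldB_char (rest : List (List (String × String))) :
    ∀ (acc : List (List (String × String))) (prev : List (String × String)),
      ((List.zip (prev :: rest) rest).foldl
        (fun out pc => if pvRole pc.2 != pvRole pc.1 then out ++ [pc.2] else out) acc)
        = acc ++ pvCollapseFrom (pvRole prev) rest := by
  induction rest with
  | nil => intro acc prev; simp [pvCollapseFrom]
  | cons x r ih =>
    intro acc prev
    rw [show List.zip (prev :: x :: r) (x :: r) = (prev, x) :: List.zip (x :: r) r from rfl,
      List.foldl_cons, ih]
    by_cases h : pvRole x = pvRole prev
    · simp [pvCollapseFrom, h]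
    · simp [pvCollapseFrom, h, bne_iff_ne]

lemma altB_char (msgs : List (List (String × String))) :
    fix_message_history_alt msgs = pvHeadCollapse (msgs.filter pvRel) := by
  unfold fix_message_history_alt
  have : msgs.filter (fun m => pvRole m == "user" || pvRole m == "assistant") = msgs.filter pvRel := rfl
  rw [this]
  cases h : msgs.filter pvRel with
  | nil => simp [pvHeadCollapse]
  | cons m rest => exact foldB_char rest [m] m

-- ===== VERDICT (by name: the statement is the Claim_ definition above) =====
theorem fix_message_history_spec : Claim_equal_fix_message_history := by
  intro messages _ _
  unfold Spec_fix_message_history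
  rw [altB_char]
  show (messages.foldl pvStepA ([], false, false)).1 = _
  simpa using (foldA_char messages []).2.2
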